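-- pv_equiv track=rewrite | github.com/xiaoliuzhuan/model-relay-desktop | python-src/modules/hosts/hosts_text.py | remove_legacy_hosts_entries
-- ===== SOURCE A (Python) =====
-- HOSTS_ENTRY_MARKER = "# Added by MTGA"
--
-- def remove_legacy_hosts_entries(content: str, domain: str) -> tuple[str, int]:
--     """
--     移除旧版本逐条写入的 hosts 记录，返回新内容与删除数量。
--     旧格式为一条注释配合单个域名记录。
--     """
--     lines = content.splitlines()
--     new_lines: list[str] = []
--     skip_block = False
--     removed_entries = 0
--
--     for line in lines:
--         if skip_block:
--             if domain in line:
--                 removed_entries += 1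
--                 continue
--             if not line.strip():
--                 skip_block = False
--                 continue
--             skip_block = False
--         if HOSTS_ENTRY_MARKER in line:
--             if new_lines and not new_lines[-1].strip():
--                 new_lines.pop()
--             skip_block = True
--             continue
--         new_lines.append(line)
--
--     trailing_newline = content.endswith("\n")
--     new_content = "\n".join(new_lines)
--     if trailing_newline:
--         new_content += "\n"
--     return new_content, removed_entries
-- ===== SOURCE B (Python) =====
-- HOSTS_ENTRY_MARKER = "# Added by MTGA"
--
-- def remove_legacy_hosts_entries(content: str, domain: str) -> tuple[str, int]:
--     # Block-oriented: repeatedly search for the next marker line, keep the slice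
--     # before it wholesale, then strip the block (run of domain lines plus one
--     # blank terminator) off the front of the remainder.
--     rest = content.splitlines()
--     kept: list[str] = []
--     removed = 0
--     while True:
--         j = next((k for k, l in enumerate(rest) if HOSTS_ENTRY_MARKER in l), None)
--         if j is None:
--             kept.extend(rest)
--             break
--         kept.extend(rest[:j])
--         if kept and not kept[-1].strip():
--             kept.pop()
--         rest = rest[j + 1:]
--         n = 0
--         while n < len(rest) and domain in rest[n]:
--             n += 1
--         removed += n
--         rest = rest[n:]
--         if rest and not rest[0].strip():
--             rest = rest[1:]
--     out = "\n".join(kept)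
--     if content.endswith("\n"):
--         out += "\n"
--     return out, removed
-- ===== Notes on version B (the rewrite author's own statement) =====
-- stated objective: alternative
-- what changed: Replaces A's per-line skip_block state machine by a block-oriented algorithm: repeatedly search for the next marker line (next/enumerate), keep the preceding slice wholesale, and strip the block (domain-line run plus one blank terminator) off the front of the remainder by slicing.
import Mathlib
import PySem

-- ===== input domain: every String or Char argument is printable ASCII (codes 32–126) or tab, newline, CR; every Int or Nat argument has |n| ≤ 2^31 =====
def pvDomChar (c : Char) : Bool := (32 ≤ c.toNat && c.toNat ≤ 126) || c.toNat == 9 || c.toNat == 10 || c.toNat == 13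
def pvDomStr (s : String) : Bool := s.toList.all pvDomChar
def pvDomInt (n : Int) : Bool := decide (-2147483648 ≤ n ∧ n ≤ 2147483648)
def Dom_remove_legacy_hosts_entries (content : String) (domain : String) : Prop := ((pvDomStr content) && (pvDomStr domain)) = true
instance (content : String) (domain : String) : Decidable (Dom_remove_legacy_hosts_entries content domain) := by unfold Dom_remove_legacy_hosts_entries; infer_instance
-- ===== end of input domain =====

-- B replaces A's per-line skip_block state machine by a block-oriented algorithm:
-- search for the next marker line, keep the preceding slice wholesale, strip the
-- block off the front of the remainder (objective: alternative, same cost).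

-- ===== PORT A =====
def pvMarker : String := "# Added by MTGA"

-- 'not line.strip()' (emptiness of the stripped line)
def pvBlank (line : String) : Bool := PySem.Str.len (PySem.Str.strip line) == 0

-- 'if new_lines and not new_lines[-1].strip(): new_lines.pop()'  (shared snippet of both Pythons)
def pvPopBlank (new_lines : List String) : List String :=
  match new_lines.getLast? with
  | some l => if pvBlank l then new_lines.dropLast else new_lines
  | none => new_lines

-- the tail of A's loop body, reached when skip_block is (or has just become) False
def pvAfterSkip (new_lines : List String) (removed : Int) (line : String) :
    List String × Bool × Int :=
  if PySem.Str.isIn pvMarker line then (pvPopBlank new_lines, true, removed)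
  else (new_lines ++ [line], false, removed)

-- one iteration of A's for-loop over (new_lines, skip_block, removed_entries)
def pvStepA (domain : String) (st : List String × Bool × Int) (line : String) :
    List String × Bool × Int :=
  let (new_lines, skip_block, removed) := st
  if skip_block then
    if PySem.Str.isIn domain line then (new_lines, true, removed + 1)
    else if pvBlank line then (new_lines, false, removed)
    else pvAfterSkip new_lines removed line
  else pvAfterSkip new_lines removed line

def remove_legacy_hosts_entries (content : String) (domain : String) : String × Int :=
  let lines := PySem.Str.splitlines content
  let st := lines.foldl (pvStepA domain) ([], false, 0)
  let new_content := PySem.Str.join "\n" st.1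
  let new_content := if PySem.Str.endswith content "\n" then new_content ++ "\n" else new_content
  (new_content, st.2.2)

-- ===== PORT B =====
-- inner counting loop 'while n < len(rest) and domain in rest[n]: n += 1'
def pvRunLen (domain : String) : List String → Nat
  | [] => 0
  | l :: rest => if PySem.Str.isIn domain l then pvRunLen domain rest + 1 else 0

-- 'if rest and not rest[0].strip(): rest = rest[1:]'
def pvDropBlank1 : List String → List String
  | [] => []
  | b :: t => if pvBlank b then t else b :: t

-- needed by pvBlocksB's termination proof
theorem pvDropBlank1_len (l : List String) : (pvDropBlank1 l).length ≤ l.length := by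
  cases l with
  | nil => simp [pvDropBlank1]
  | cons b t => simp only [pvDropBlank1]; split <;> simp

-- the outer 'while True' loop of Source B over (rest, kept, removed)
def pvBlocksB (domain : String) (rest kept : List String) (removed : Int) : List String × Int :=
  match h : rest.findIdx? (fun l => PySem.Str.isIn pvMarker l) with
  | none => (kept ++ rest, removed)
  | some j =>
    let kept' := pvPopBlank (kept ++ rest.take j)
    let rest' := rest.drop (j + 1)
    let n := pvRunLen domain rest'
    pvBlocksB domain (pvDropBlank1 (rest'.drop n)) kept' (removed + n)
  termination_by rest.length
  decreasing_by
    have hj : j < rest.length := (List.findIdx?_eq_some_iff_findIdx_eq.mp h).1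
    have h1 := pvDropBlank1_len ((List.drop (j + 1) rest).drop (pvRunLen domain (List.drop (j + 1) rest)))
    simp only [List.drop_drop, List.length_drop] at h1 ⊢
    omega

def remove_legacy_hosts_entries_alt (content : String) (domain : String) : String × Int :=
  let lines := PySem.Str.splitlines content
  let res := pvBlocksB domain lines [] 0
  let new_content := PySem.Str.join "\n" res.1
  let new_content := if PySem.Str.endswith content "\n" then new_content ++ "\n" else new_content
  (new_content, res.2)

-- ===== PRECONDITION & SPEC =====
def Spec_remove_legacy_hosts_entries (content : String) (domain : String) (out : String × Int) : Prop := out = remove_legacy_hosts_entries_alt content domain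
instance (content : String) (domain : String) (out : String × Int) : Decidable (Spec_remove_legacy_hosts_entries content domain out) := by unfold Spec_remove_legacy_hosts_entries; infer_instance

-- ===== CLAIM (what is proved, stated in full; the proofs are below) =====
def Claim_equal_remove_legacy_hosts_entries : Prop := ∀ (content : String) (domain : String), Dom_remove_legacy_hosts_entries content domain → Spec_remove_legacy_hosts_entries content domain (remove_legacy_hosts_entries content domain)

-- ===== LEMMAS AND PROOFS =====

-- unfolding equations of pvBlocksB, one per branch of the marker search
theorem pvBlocksB_none (domain : String) (rest kept : List String) (removed : Int)
    (h : rest.findIdx? (fun l => PySem.Str.isIn pvMarker l) = none) :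
    pvBlocksB domain rest kept removed = (kept ++ rest, removed) := by
  rw [pvBlocksB.eq_def]
  split
  · rfl
  · rename_i j' heq
    rw [h] at heq
    cases heq

theorem pvBlocksB_some (domain : String) (rest kept : List String) (removed : Int) (j : Nat)
    (h : rest.findIdx? (fun l => PySem.Str.isIn pvMarker l) = some j) :
    pvBlocksB domain rest kept removed =
      pvBlocksB domain
        (pvDropBlank1 ((rest.drop (j + 1)).drop (pvRunLen domain (rest.drop (j + 1)))))
        (pvPopBlank (kept ++ rest.take j))
        (removed + (pvRunLen domain (rest.drop (j + 1)) : Int)) := by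
  rw [pvBlocksB.eq_def]
  split
  · rename_i heq
    rw [h] at heq
    cases heq
  · rename_i j' heq
    rw [h] at heq
    injection heq with hj'
    subst hj'
    rfl

-- proof-side reformulation of A's fold as a mutual recursion (skip=false / skip=true phases)
mutual
def pvOuterA (domain : String) : List String → List String → Int → List String × Int
  | [], acc, _removed => (acc, _removed)
  | line :: rest, acc, removed =>
    if PySem.Str.isIn pvMarker line = false then
      pvOuterA domain rest (acc ++ [line]) removed
    else
      pvInnerA domain rest (pvPopBlank acc) removed
  termination_by l _ _ => (l.length, 0)
  decreasing_by all_goals simp_wf; omega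
def pvInnerA (domain : String) : List String → List String → Int → List String × Int
  | [], acc, _removed => (acc, _removed)
  | cur :: rest, acc, removed =>
    if PySem.Str.isIn domain cur then pvInnerA domain rest acc (removed + 1)
    else if pvBlank cur then pvOuterA domain rest acc removed
    else pvOuterA domain (cur :: rest) acc removed
  termination_by l _ _ => (l.length, 1)
  decreasing_by all_goals simp_wf; omega
end

-- A's foldl from skip=false agrees with pvOuterA, and from skip=true with pvInnerA
theorem pvLoopEq (domain : String) (ls : List String) : ∀ (acc : List String) (rem : Int),
    ((ls.foldl (pvStepA domain) (acc, false, rem)).1,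
     (ls.foldl (pvStepA domain) (acc, false, rem)).2.2) = pvOuterA domain ls acc rem ∧
    ((ls.foldl (pvStepA domain) (acc, true, rem)).1,
     (ls.foldl (pvStepA domain) (acc, true, rem)).2.2) = pvInnerA domain ls acc rem := by
  induction ls with
  | nil => intro acc rem; simp [pvOuterA, pvInnerA]
  | cons l rest ih =>
    intro acc rem
    constructor
    · rw [pvOuterA]
      by_cases hm : PySem.Chars.isIn pvMarker.toList l.toList = true
      · simp [pvStepA, pvAfterSkip, hm]
        exact (ih (pvPopBlank acc) rem).2
      · simp [pvStepA, pvAfterSkip, hm]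
        exact (ih (acc ++ [l]) rem).1
    · rw [pvInnerA]
      by_cases hd : PySem.Chars.isIn domain.toList l.toList = true
      · simp [pvStepA, hd]
        exact (ih acc (rem + 1)).2
      · by_cases hb : pvBlank l
        · simp [pvStepA, hd, hb]
          exact (ih acc rem).1
        · rw [pvOuterA]
          by_cases hm : PySem.Chars.isIn pvMarker.toList l.toList = true
          · simp [pvStepA, pvAfterSkip, hd, hb, hm]
            exact (ih (pvPopBlank acc) rem).2
          · simp [pvStepA, pvAfterSkip, hd, hb, hm]
            exact (ih (acc ++ [l]) rem).1

-- pvInnerA consumes exactly the domain run, then one blank, then resumes pvOuterA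
theorem pvInnerA_run (domain : String) (ls : List String) : ∀ (acc : List String) (rem : Int),
    pvInnerA domain ls acc rem =
      (match ls.drop (pvRunLen domain ls) with
       | [] => (acc, rem + (pvRunLen domain ls : Int))
       | b :: t => if pvBlank b then pvOuterA domain t acc (rem + (pvRunLen domain ls : Int))
                   else pvOuterA domain (b :: t) acc (rem + (pvRunLen domain ls : Int))) := by
  induction ls with
  | nil => intro acc rem; simp [pvInnerA, pvRunLen]
  | cons l rest ih =>
    intro acc rem
    by_cases hd : PySem.Str.isIn domain l = true
    · rw [pvInnerA]
      simp only [hd, if_true, pvRunLen, ih acc (rem + 1)]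
      have : (rem + 1) + (pvRunLen domain rest : Int) = rem + ((pvRunLen domain rest + 1 : Nat) : Int) := by
        push_cast; ring
      rw [this]
      simp [List.drop_succ_cons]
    · rw [pvInnerA]
      simp only [hd, pvRunLen]
      simp

-- pvOuterA equals B's block loop
theorem pvOuterA_eq_blocks_aux (domain : String) (n : Nat) :
    ∀ (ls : List String), ls.length ≤ n → ∀ (acc : List String) (rem : Int),
      pvOuterA domain ls acc rem = pvBlocksB domain ls acc rem := by
  induction n with
  | zero =>
    intro ls hlen acc rem
    have hnil : ls = [] := by cases ls <;> simp_all
    subst hnil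
    rw [pvOuterA, pvBlocksB_none _ _ _ _ (by simp)]
    simp
  | succ n ih =>
    intro ls hlen acc rem
    cases ls with
    | nil => rw [pvOuterA, pvBlocksB_none _ _ _ _ (by simp)]; simp
    | cons l rest =>
      have hrest : rest.length ≤ n := by simp at hlen; omega
      by_cases hm : PySem.Str.isIn pvMarker l = true
      · rw [pvOuterA, if_neg (by intro hc; rw [hm] at hc; exact Bool.noConfusion hc)]
        have hfind : (l :: rest).findIdx? (fun x => PySem.Str.isIn pvMarker x) = some 0 := by
          rw [List.findIdx?_cons, if_pos hm]
        rw [pvBlocksB_some _ _ _ _ 0 hfind]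
        simp only [List.take_zero, List.drop_succ_cons, List.drop_zero, List.append_nil]
        rw [pvInnerA_run]
        set n0 := pvRunLen domain rest with hn0
        have hdrop : (rest.drop n0).length ≤ n :=
          le_trans (by simp) hrest
        cases hdr : rest.drop n0 with
        | nil =>
          simp only [pvDropBlank1]
          rw [pvBlocksB_none _ _ _ _ (by simp)]
          simp
        | cons b t =>
          rw [hdr] at hdrop
          simp only [pvDropBlank1]
          by_cases hb : pvBlank b = true
          · simp only [hb, if_true]
            exact ih t (by simp at hdrop; omega) (pvPopBlank acc) (rem + n0)
          · simp only [hb]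
            exact ih (b :: t) hdrop (pvPopBlank acc) (rem + n0)
      · have hm' : PySem.Str.isIn pvMarker l = false := (Bool.not_eq_true _).mp hm
        rw [pvOuterA, if_pos hm']
        have hshift : pvBlocksB domain (l :: rest) acc rem = pvBlocksB domain rest (acc ++ [l]) rem := by
          cases hf : rest.findIdx? (fun x => PySem.Str.isIn pvMarker x) with
          | none =>
            have hfind : (l :: rest).findIdx? (fun x => PySem.Str.isIn pvMarker x) = none := by
              rw [List.findIdx?_cons, if_neg (by rw [hm']; exact Bool.noConfusion), hf]
              rfl
            rw [pvBlocksB_none _ _ _ _ hfind, pvBlocksB_none _ _ _ _ hf]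
            simp
          | some j =>
            have hfind : (l :: rest).findIdx? (fun x => PySem.Str.isIn pvMarker x) = some (j + 1) := by
              rw [List.findIdx?_cons, if_neg (by rw [hm']; exact Bool.noConfusion), hf]
              rfl
            rw [pvBlocksB_some _ _ _ _ (j + 1) hfind, pvBlocksB_some _ _ _ _ j hf]
            simp only [List.take_succ_cons, List.drop_succ_cons]
            rw [show acc ++ l :: rest.take j = (acc ++ [l]) ++ rest.take j by simp]
        rw [hshift]
        exact ih rest hrest (acc ++ [l]) rem

theorem pvOuterA_eq_blocks (domain : String) (ls acc : List String) (rem : Int) :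
    pvOuterA domain ls acc rem = pvBlocksB domain ls acc rem :=
  pvOuterA_eq_blocks_aux domain ls.length ls le_rfl acc rem

-- ===== VERDICT (by name: the statement is the Claim_ definition above) =====
theorem remove_legacy_hosts_entries_spec : Claim_equal_remove_legacy_hosts_entries := by
  intro content domain _
  unfold Spec_remove_legacy_hosts_entries remove_legacy_hosts_entries remove_legacy_hosts_entries_alt
  have h := (pvLoopEq domain (PySem.Str.splitlines content) [] 0).1
  rw [pvOuterA_eq_blocks] at h
  have h1 : ((PySem.Str.splitlines content).foldl (pvStepA domain) ([], false, 0)).1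
      = (pvBlocksB domain (PySem.Str.splitlines content) [] 0).1 := by rw [← h]
  have h2 : ((PySem.Str.splitlines content).foldl (pvStepA domain) ([], false, 0)).2.2
      = (pvBlocksB domain (PySem.Str.splitlines content) [] 0).2 := by rw [← h]
  simp only [h1, h2]
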